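-- pv_equiv track=rewrite | github.com/maremita/slm_kgenomvir | lm_genomvir/bio/kmer_collections.py | get_index_from_kmer
-- ===== SOURCE A (Python) =====
-- def get_index_from_kmer(kmer, k):
--     """
--     Function adapted from module enrich.pyx of
--     GenomeClassifier package [Sandberg et al. (2001)]
--
--     Instead of starting by f=1 and multiplying it by 4,
--     it starts with f= 4**(k-1) and divide it by 4
--     in each iteration
--
--     The returned index respects the result of itertools.product()
--     ["".join(t) for t in itertools.product('ACGT', repeat=k)]
--     """
--
--     f= 4 ** (k-1)
--     s=0
--     alpha_to_code = {'A':0, 'C':1, 'G':2, 'T':3}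
--
--     for i in range(0, k):
--         alpha_code=alpha_to_code[kmer[i]]
--         s = s + alpha_code * f
--         f = f // 4
--
--     return s
-- ===== SOURCE B (Python) =====
-- def get_index_from_kmer(kmer, k):
--     """Horner scan over the first k characters: no positional weight, no dict."""
--     s = 0
--     for c in kmer[:max(k, 0)]:
--         s = 4 * s + "ACGT".index(c)
--     return s
-- ===== Notes on version B (the rewrite author's own statement) =====
-- stated objective: simpler
-- what changed: Replaces A's index loop with a dict lookup and explicit positional weights (f = 4**(k-1), f //= 4) by a direct Horner scan over the sliced characters kmer[:max(k,0)], using "ACGT".index for the digit; no index variable, no weight, no dict.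
import Mathlib
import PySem

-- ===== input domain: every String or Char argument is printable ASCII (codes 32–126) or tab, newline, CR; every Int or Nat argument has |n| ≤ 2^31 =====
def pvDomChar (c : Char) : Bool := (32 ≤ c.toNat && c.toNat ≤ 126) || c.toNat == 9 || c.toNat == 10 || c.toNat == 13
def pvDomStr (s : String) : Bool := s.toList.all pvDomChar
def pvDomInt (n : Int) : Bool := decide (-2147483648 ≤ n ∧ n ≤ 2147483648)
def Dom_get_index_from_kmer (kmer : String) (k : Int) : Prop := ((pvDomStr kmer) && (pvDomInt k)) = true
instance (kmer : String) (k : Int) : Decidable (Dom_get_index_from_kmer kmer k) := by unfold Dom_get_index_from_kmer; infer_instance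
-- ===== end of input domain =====

-- ===== PORT A =====
-- B replaces A's index loop with its dict and explicit positional weights (f = 4**(k-1),
-- f //= 4) by a Horner scan over the sliced characters themselves; objective: simpler.

-- A's dict literal {'A':0,'C':1,'G':2,'T':3}
def alphaToCode : PySem.Dict Char Int :=
  PySem.Dict.ofList [('A', 0), ('C', 1), ('G', 2), ('T', 3)]

-- port of A: f = 4**(k-1); s = 0; for i in range(0,k): s += code[kmer[i]] * f; f //= 4
-- (lookup/index failure = Python's KeyError/IndexError, modelled as a `none` state,
--  excluded by Pre_; the final `.getD 0` is never reached with a none state under Pre_)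
def get_index_from_kmer (kmer : String) (k : Int) : Int :=
  let f0 : Int := 4 ^ (k - 1).toNat
  let r : Option (Int × Int) :=
    (PySem.List.pyRange 0 k 1).foldl
      (fun st i =>
        st.bind fun sf =>
          (PySem.Str.pyGet? kmer i).bind fun c =>
            (alphaToCode.get? c).map fun code =>
              (sf.1 + code * sf.2, PySem.Int.floordiv sf.2 4))
      (some (0, f0))
  (r.map (·.1)).getD 0

-- ===== PORT B =====
-- port of B: s = 0; for c in kmer[:max(k,0)]: s = 4*s + "ACGT".index(c); return s
-- ("ACGT".index(c) raising ValueError is modelled as a `none` state, excluded by Pre_)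
def get_index_from_kmer_alt (kmer : String) (k : Int) : Int :=
  let r : Option Int :=
    (PySem.Str.slice kmer none (some (max k 0))).toList.foldl
      (fun st c =>
        st.bind fun s =>
          (PySem.List.index? "ACGT".toList c).map fun d => 4 * s + Int.ofNat d)
      (some 0)
  r.getD 0

-- ===== PRECONDITION & SPEC =====
-- Pre_ excludes exactly the inputs where A raises: an index i < k beyond the string
-- (IndexError) or a character among the first k not in 'ACGT' (KeyError).
def Pre_get_index_from_kmer (kmer : String) (k : Int) : Prop :=
  k ≤ (kmer.toList.length : Int) ∧
    (kmer.toList.take k.toNat).all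
      (fun c => c == 'A' || c == 'C' || c == 'G' || c == 'T') = true
instance (kmer : String) (k : Int) : Decidable (Pre_get_index_from_kmer kmer k) := by
  unfold Pre_get_index_from_kmer; infer_instance

def pvWitness_get_index_from_kmer : String × Int := ("A", 1)

def Spec_get_index_from_kmer (kmer : String) (k : Int) (out : Int) : Prop := out = get_index_from_kmer_alt kmer k
instance (kmer : String) (k : Int) (out : Int) : Decidable (Spec_get_index_from_kmer kmer k out) := by
  unfold Spec_get_index_from_kmer; infer_instance

-- ===== CLAIM (what is proved, stated in full; the proofs are below) =====
def Claim_equal_get_index_from_kmer : Prop := ∀ (kmer : String) (k : Int), Dom_get_index_from_kmer kmer k → Pre_get_index_from_kmer kmer k → Spec_get_index_from_kmer kmer k (get_index_from_kmer kmer k)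

-- ===== LEMMAS AND PROOFS =====

-- the digit of a nucleotide (proof-side; both ports' lookups reduce to it on ACGT)
def pvCode (c : Char) : Int :=
  if c = 'A' then 0 else if c = 'C' then 1 else if c = 'G' then 2 else 3

-- Horner value of a character list
def pvH (s : Int) (cs : List Char) : Int := cs.foldl (fun s c => 4 * s + pvCode c) s

-- B's option-threaded fold succeeds on ACGT characters and computes pvH
theorem pvB_loop : ∀ (cs : List Char) (s : Int),
    (∀ c ∈ cs, c = 'A' ∨ c = 'C' ∨ c = 'G' ∨ c = 'T') →
    cs.foldl
      (fun st c =>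
        st.bind fun s =>
          (PySem.List.index? "ACGT".toList c).map fun d => 4 * s + Int.ofNat d)
      (some s) = some (pvH s cs) := by
  intro cs
  induction cs with
  | nil => intro s _; simp [pvH]
  | cons c cs ih =>
    intro s H
    have hc := H c (by simp)
    obtain ⟨dn, hdn, hdv⟩ : ∃ dn : Nat, PySem.List.index? "ACGT".toList c = some dn
        ∧ Int.ofNat dn = pvCode c := by
      rcases hc with h | h | h | h <;> subst h
      · exact ⟨0, by decide, by decide⟩
      · exact ⟨1, by decide, by decide⟩
      · exact ⟨2, by decide, by decide⟩
      · exact ⟨3, by decide, by decide⟩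
    simp only [List.foldl_cons, Option.bind_some, hdn, Option.map_some, hdv]
    rw [ih _ (fun c hc => H c (by simp [hc]))]
    simp [pvH]

-- A's second loop component after m iterations
def pvF (K m : Nat) : Int := if m < K then (4 : Int) ^ (K - 1 - m) else 0

-- A's fold over the first m indices, from weight 4^(K-1): value = pvH of the prefix,
-- scaled by the remaining weight 4^(K-m)
theorem pvA_loop (kmer : String) (K : Nat) (hK : 1 ≤ K)
    (hlen : K ≤ kmer.toList.length)
    (H : ∀ j, j < K → kmer.toList[j]! = 'A' ∨ kmer.toList[j]! = 'C'
        ∨ kmer.toList[j]! = 'G' ∨ kmer.toList[j]! = 'T') :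
    ∀ m : Nat, m ≤ K →
    (PySem.List.pyRange 0 (m : Int) 1).foldl
      (fun st i =>
        st.bind fun sf =>
          (PySem.Str.pyGet? kmer i).bind fun c =>
            (alphaToCode.get? c).map fun code =>
              (sf.1 + code * sf.2, PySem.Int.floordiv sf.2 4))
      (some (0, (4 : Int) ^ (K - 1)))
      = some (pvH 0 (kmer.toList.take m) * 4 ^ (K - m), pvF K m) := by
  intro m
  induction m with
  | zero =>
    intro _
    rw [PySem.List.pyRange_one_eq_nil (by omega)]
    have h0 : 0 < K := hK
    simp [pvH, pvF, h0]
  | succ m ih =>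
    intro hm
    have hmK : m < K := by omega
    have hmlen : m < kmer.toList.length := by omega
    have hsplit : PySem.List.pyRange 0 ((m + 1 : Nat) : Int) 1
        = PySem.List.pyRange 0 (m : Int) 1 ++ [(m : Int)] := by
      push_cast
      exact PySem.List.pyRange_one_succ_right (by omega)
    rw [hsplit, List.foldl_append, ih (by omega)]
    have hget : PySem.Str.pyGet? kmer (m : Int) = some (kmer.toList[m]!) := by
      simp [List.getElem?_eq_getElem hmlen, List.getElem!_eq_getElem?_getD,
        List.getElem?_eq_getElem hmlen]
    have hc := H m hmK
    have hcode : alphaToCode.get? (kmer.toList[m]!) = some (pvCode (kmer.toList[m]!)) := by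
      rcases hc with h | h | h | h <;> rw [h] <;> decide
    have hF : pvF K m = (4 : Int) ^ (K - 1 - m) := by simp [pvF, hmK]
    simp only [List.foldl_cons, List.foldl_nil, Option.bind_some, hget, hcode,
      Option.map_some, hF]
    have htake : kmer.toList.take (m + 1)
        = kmer.toList.take m ++ [kmer.toList[m]!] := by
      rw [List.take_add_one, List.getElem?_eq_getElem hmlen]
      simp only [List.getElem!_eq_getElem?_getD, List.getElem?_eq_getElem hmlen,
        Option.toList_some, Option.getD_some]
    simp only [Option.some.injEq, Prod.mk.injEq]
    refine ⟨?_, ?_⟩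
    · rw [htake]
      unfold pvH
      rw [List.foldl_append]
      simp only [List.foldl_cons, List.foldl_nil]
      have h4 : (4 : Int) ^ (K - m) = 4 * 4 ^ (K - 1 - m) := by
        rw [← pow_succ']
        congr 1
        omega
      have he : K - (m + 1) = K - 1 - m := by omega
      rw [h4, he]
      ring
    · by_cases h : m + 1 < K
      · have : (4 : Int) ^ (K - 1 - m) = 4 ^ (K - 1 - (m + 1)) * 4 := by
          rw [← pow_succ]
          congr 1
          omega
        rw [this, PySem.Int.floordiv_eq_ediv_of_pos (by norm_num),
          Int.mul_ediv_cancel _ (by norm_num)]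
        simp [pvF, h]
      · have hm1 : m + 1 = K := by omega
        have : K - 1 - m = 0 := by omega
        rw [this]
        simp [pvF, hm1]

-- ===== VERDICT (by name: the statement is the Claim_ definition above) =====
theorem get_index_from_kmer_spec : Claim_equal_get_index_from_kmer := by
  intro kmer k _ hpre
  obtain ⟨hlen, hchars⟩ := hpre
  unfold Spec_get_index_from_kmer get_index_from_kmer get_index_from_kmer_alt
  dsimp only
  by_cases hk : k ≤ 0
  · have hmax : max k 0 = 0 := by omega
    rw [PySem.List.pyRange_one_eq_nil hk, hmax]
    simp [PySem.Str.slice, PySem.List.slice_to _ (le_refl (0 : Int))]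
  · push Not at hk
    set K := k.toNat with hKdef
    have hkK : (K : Int) = k := Int.toNat_of_nonneg (by omega)
    have hK1 : 1 ≤ K := by omega
    have hKlen : K ≤ kmer.toList.length := by omega
    have hmem : ∀ j, j < K → kmer.toList[j]! = 'A' ∨ kmer.toList[j]! = 'C'
        ∨ kmer.toList[j]! = 'G' ∨ kmer.toList[j]! = 'T' := by
      intro j hj
      have hjlen : j < kmer.toList.length := by omega
      have hget : kmer.toList[j]! = kmer.toList[j] := by
        simp [List.getElem!_eq_getElem?_getD, List.getElem?_eq_getElem hjlen]
      have hmem' : kmer.toList[j] ∈ kmer.toList.take K := by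
        rw [List.mem_take_iff_getElem]
        exact ⟨j, by omega, by simp⟩
      have := List.all_eq_true.mp hchars _ hmem'
      rw [hget]
      simpa [Bool.or_eq_true, beq_iff_eq, or_assoc] using this
    -- A side
    have hA := pvA_loop kmer K hK1 hKlen hmem K le_rfl
    rw [hkK] at hA
    have hf0 : (k - 1).toNat = K - 1 := by omega
    rw [hf0, hA]
    -- B side
    have hmax : max k 0 = k := by omega
    have hslice : (PySem.Str.slice kmer none (some (max k 0))).toList
        = kmer.toList.take K := by
      rw [hmax]
      simp [PySem.Str.slice, PySem.List.slice_to _ (by omega : (0:Int) ≤ k)]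
      rw [hKdef]
    rw [hslice, pvB_loop _ 0 (fun c hc => by
      have hm : c ∈ kmer.toList.take K := hc
      have := List.all_eq_true.mp hchars _ hm
      simpa [Bool.or_eq_true, beq_iff_eq, or_assoc] using this)]
    simp
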